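-- pv_equiv track=rewrite | github.com/aorursy/KT_dataset_py | mhasler_learn-python-challenge-day-7-exercises.py | blackjack_hand_greater_than
-- ===== SOURCE A (Python) =====
-- def blackjack_hand_greater_than(hand_1, hand_2):
--     """
--     Return True if hand_1 beats hand_2, and False otherwise.
--
--     In order for hand_1 to beat hand_2 the following must be true:
--     - The total of hand_1 must not exceed 21
--     - The total of hand_1 must exceed the total of hand_2 OR hand_2's total must exceed 21
--
--     Hands are represented as a list of cards. Each card is represented by a string.
--
--     When adding up a hand's total, cards with numbers count for that many points. Face
--     cards ('J', 'Q', and 'K') are worth 10 points. 'A' can count for 1 or 11.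
--
--     When determining a hand's total, you should try to count aces in the way that
--     maximizes the hand's total without going over 21. e.g. the total of ['A', 'A', '9'] is 21,
--     the total of ['A', 'A', '9', '3'] is 14.
--
--     Examples:
--     >>> blackjack_hand_greater_than(['K'], ['3', '4'])
--     True
--     >>> blackjack_hand_greater_than(['K'], ['10'])
--     False
--     >>> blackjack_hand_greater_than(['K', 'K', '2'], ['3'])
--     False
--     """
--     def score(c):
--         if c.isdigit(): return int(c);
--         return 10+(c=='A')
--     def val(h):
--         s = sum(score(c) for c in h)
--         if s > 21:
--             a = h.count('A')
--             while a > 0 and s > 21: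
--                 s -= 10
--                 a -= 1
--         return s
--     v1 = val(hand_1)
--     if v1 > 21: return False
--     v2 = val(hand_2)
--     return v1 > v2 or v2 > 21
-- ===== SOURCE B (Python) =====
-- def blackjack_hand_greater_than(hand_1, hand_2):
--     """Return True if hand_1 beats hand_2, and False otherwise."""
--     def value(hand):
--         # one pass: every ace scores 1 and sets a flag; afterwards a single
--         # ace is promoted to 11 (two promoted aces would always bust),
--         # which fits exactly when the all-aces-low total is at most 11
--         base, ace = 0, False
--         for c in hand:
--             if c == 'A':
--                 base += 1
--                 ace = True
--             elif c.isdigit():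
--                 base += int(c)
--             else:
--                 base += 10
--         return base + 10 if ace and base <= 11 else base
--     v1 = value(hand_1)
--     v2 = value(hand_2)
--     return v1 <= 21 and (v1 > v2 or v2 > 21)
-- ===== Notes on version B (the rewrite author's own statement) =====
-- stated objective: simpler
-- what changed: Hand value is computed in one pass with an (accumulator, ace-seen flag) state scoring every ace as 1, then a single ace is promoted to 11 when the low total is at most 11, replacing A's sum-aces-as-11 plus count('A') plus subtract-10 while-loop repair; the outer test is one boolean expression instead of an early-return branch.
import Mathlib
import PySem

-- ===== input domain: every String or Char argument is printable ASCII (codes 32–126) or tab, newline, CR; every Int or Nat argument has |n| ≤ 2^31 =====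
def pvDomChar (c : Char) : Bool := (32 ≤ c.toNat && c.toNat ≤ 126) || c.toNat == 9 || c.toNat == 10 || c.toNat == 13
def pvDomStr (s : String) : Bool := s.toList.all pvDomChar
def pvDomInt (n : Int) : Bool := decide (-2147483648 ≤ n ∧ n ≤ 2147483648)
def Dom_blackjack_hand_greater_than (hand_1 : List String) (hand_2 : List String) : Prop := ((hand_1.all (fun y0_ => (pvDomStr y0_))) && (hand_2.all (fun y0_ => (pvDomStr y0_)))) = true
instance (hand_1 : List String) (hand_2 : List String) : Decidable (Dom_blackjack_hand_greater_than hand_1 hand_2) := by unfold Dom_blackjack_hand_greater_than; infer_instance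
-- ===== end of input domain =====

-- B values a hand in one pass with an (accumulator, ace-seen flag) state, aces low,
-- promoting a single ace to 11 when the low total is ≤ 11, instead of A's
-- aces-high sum repaired by a subtract-10 while-loop (objective: simpler).

-- ===== PORT A =====
-- def score(c): if c.isdigit(): return int(c); return 10+(c=='A')
-- (int(c) cannot fail when c.isdigit() holds on the ASCII domain; .getD 0 only totalises)
def pvScoreA (c : String) : Int :=
  if PySem.Str.strIsdigit c then (PySem.Int.ofStr? c).getD 0
  else 10 + (if c == "A" then 1 else 0)

-- while a > 0 and s > 21: s -= 10; a -= 1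
def pvAceLoop : Nat → Int → Int
  | 0, s => s
  | a + 1, s => if 21 < s then pvAceLoop a (s - 10) else s

-- def val(h): s = sum(score(c) for c in h); if s > 21: a = h.count('A'); while …; return s
def pvValA (h : List String) : Int :=
  let s := h.foldl (fun acc c => acc + pvScoreA c) 0
  if 21 < s then pvAceLoop (PySem.List.count h "A") s else s

def blackjack_hand_greater_than (hand_1 : List String) (hand_2 : List String) : Bool :=
  let v1 := pvValA hand_1
  if 21 < v1 then false
  else
    let v2 := pvValA hand_2
    decide (v2 < v1) || decide (21 < v2)

-- ===== PORT B =====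
-- the body of B's for-loop: 'if c == 'A': base += 1; ace = True elif c.isdigit(): … else: base += 10'
def pvStepB (p : Int × Bool) (c : String) : Int × Bool :=
  if c == "A" then (p.1 + 1, true)
  else if PySem.Str.strIsdigit c then (p.1 + (PySem.Int.ofStr? c).getD 0, p.2)
  else (p.1 + 10, p.2)

-- def value(hand): base, ace = 0, False; for c in hand: …; return base + 10 if ace and base <= 11 else base
def pvValueB (h : List String) : Int :=
  let p := h.foldl pvStepB (0, false)
  if p.2 = true ∧ p.1 ≤ 11 then p.1 + 10 else p.1

-- v1 = value(hand_1); v2 = value(hand_2); return v1 <= 21 and (v1 > v2 or v2 > 21)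
def blackjack_hand_greater_than_alt (hand_1 : List String) (hand_2 : List String) : Bool :=
  let v1 := pvValueB hand_1
  let v2 := pvValueB hand_2
  decide (v1 ≤ 21) && (decide (v2 < v1) || decide (21 < v2))

-- ===== PRECONDITION & SPEC =====
def Spec_blackjack_hand_greater_than (hand_1 : List String) (hand_2 : List String) (out : Bool) : Prop := out = blackjack_hand_greater_than_alt hand_1 hand_2
instance (hand_1 : List String) (hand_2 : List String) (out : Bool) : Decidable (Spec_blackjack_hand_greater_than hand_1 hand_2 out) := by unfold Spec_blackjack_hand_greater_than; infer_instance

-- ===== CLAIM =====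
def Claim_equal_blackjack_hand_greater_than : Prop := ∀ (hand_1 : List String) (hand_2 : List String), Dom_blackjack_hand_greater_than hand_1 hand_2 → Spec_blackjack_hand_greater_than hand_1 hand_2 (blackjack_hand_greater_than hand_1 hand_2)

-- ===== LEMMAS AND PROOFS =====

-- per-card value with aces low, as B's loop adds it (proof-only helper)
def pvCardW (c : String) : Int :=
  if c == "A" then 1
  else if PySem.Str.strIsdigit c then (PySem.Int.ofStr? c).getD 0
  else 10

-- a digit string has no int-whitespace and no sign, and int() of it is a Nat cast, hence ≥ 0
lemma pv_dropWhile_no (p : Char → Bool) (l : List Char) (h : ∀ x ∈ l, p x = false) :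
    l.dropWhile p = l := by
  cases l with
  | nil => rfl
  | cons c t => simp [h c (by simp)]

lemma pv_opt_nat_nonneg (o : Option Nat) :
    0 ≤ (Option.map (fun n : Int => n) (o.bind (fun a => some ((a : Int))))).getD 0 := by
  cases o <;> simp

lemma pv_ofChars?_nonneg (s : List Char) (h : PySem.Chars.strIsdigit s = true) :
    0 ≤ (PySem.Int.ofChars? s).getD 0 := by
  simp only [PySem.Chars.strIsdigit, Bool.and_eq_true, List.all_eq_true] at h
  obtain ⟨hne, hdig⟩ := h
  have hnospace : ∀ x ∈ s, PySem.Int.isIntSpace x = false := by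
    intro x hx
    have hd := hdig x hx
    cases hsp : PySem.Int.isIntSpace x
    · rfl
    · exfalso
      simp only [PySem.Int.isIntSpace, Bool.or_eq_true, decide_eq_true_eq] at hsp
      rcases hsp with ((((rfl | rfl) | rfl) | rfl) | rfl) | rfl <;> revert hd <;> decide
  simp only [PySem.Int.ofChars?]
  rw [pv_dropWhile_no _ _ hnospace,
      pv_dropWhile_no _ _ (fun x hx => hnospace x (by simpa using hx)),
      List.reverse_reverse]
  cases s with
  | nil => simp at hne
  | cons c t =>
    have hc : PySem.Chars.isdigit c = true := hdig c (by simp)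
    split
    · next ds heq => injection heq with h1 _; rw [h1] at hc; exact absurd hc (by decide)
    · next ds heq => injection heq with h1 _; rw [h1] at hc; exact absurd hc (by decide)
    · exact pv_opt_nat_nonneg _

lemma pv_cardW_nonneg (c : String) : (if c == "A" then (1 : Int) else 0) ≤ pvCardW c := by
  unfold pvCardW
  by_cases hA : c = "A"
  · subst hA; decide
  · have hcA : (c == "A") = false := by simpa using hA
    rw [hcA]
    simp only [Bool.false_eq_true, if_false]
    by_cases hd : PySem.Str.strIsdigit c = true
    · rw [if_pos hd]
      simp only [PySem.Int.ofStr?]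
      exact pv_ofChars?_nonneg _ (by rw [← PySem.Str.strIsdigit_eq]; exact hd)
    · rw [if_neg hd]
      simp

-- score_A c = cardW c + 10·[c = 'A']
lemma pv_score_card (c : String) :
    pvScoreA c = pvCardW c + (if c == "A" then (10 : Int) else 0) := by
  unfold pvScoreA pvCardW
  by_cases hA : c = "A"
  · subst hA; decide
  · have hcA : (c == "A") = false := by simpa using hA
    simp [hcA]

-- one step of B's loop adds cardW and ORs in the ace flag
lemma pv_stepB_head (a : Int) (b : Bool) (c : String) :
    pvStepB (a, b) c = (a + pvCardW c, b || (c == "A")) := by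
  unfold pvStepB pvCardW
  by_cases hA : c = "A"
  · subst hA; simp
  · have hcA : (c == "A") = false := by simpa using hA
    rw [hcA]
    simp only [Bool.false_eq_true, if_false]
    split_ifs <;> simp

-- B's one-pass loop computes (start + Σ cardW, flag ∨ an ace occurs)
lemma pv_stepB_fold (l : List String) (a : Int) (b : Bool) :
    l.foldl pvStepB (a, b) = (a + (l.map pvCardW).sum, b || l.any (fun c => c == "A")) := by
  induction l generalizing a b with
  | nil => simp
  | cons c t ih =>
    rw [List.foldl_cons, pv_stepB_head, ih]
    simp [add_assoc, Bool.or_assoc]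

-- A's foldl accumulation as map-sum
lemma pv_foldl_sum (f : String → Int) (l : List String) (a : Int) :
    l.foldl (fun acc c => acc + f c) a = a + (l.map f).sum := by
  induction l generalizing a with
  | nil => simp
  | cons c t ih => simp [ih]; ring

-- sum with aces as 11  =  sum with aces as 1  +  10 · (#aces)
lemma pv_sum_split (h : List String) :
    (h.map pvScoreA).sum = (h.map pvCardW).sum + 10 * (List.count "A" h : Int) := by
  induction h with
  | cons c t ih =>
    simp only [List.map_cons, List.sum_cons, ih, pv_score_card c, List.count_cons]
    by_cases hA : c = "A"
    · subst hA; simp; ring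
    · simp only [beq_iff_eq, hA, if_false]
      push_cast; ring
  | nil => simp

-- each ace contributes at least 1 to the low sum, other cards at least 0
lemma pv_base_ge_count (h : List String) :
    (List.count "A" h : Int) ≤ (h.map pvCardW).sum := by
  induction h with
  | nil => simp
  | cons c t ih =>
    simp only [List.map_cons, List.sum_cons, List.count_cons]
    by_cases hA : c = "A"
    · have h1 : (1 : Int) ≤ pvCardW c := by simpa [hA] using pv_cardW_nonneg c
      subst hA
      simp
      omega
    · have hcA : (c == "A") = false := by simpa using hA
      have h0 : (0 : Int) ≤ pvCardW c := by simpa [hcA] using pv_cardW_nonneg c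
      simp [hA]
      omega

lemma pv_any_iff_count (h : List String) :
    (h.any (fun c => c == "A")) = true ↔ 0 < List.count "A" h := by
  simp [List.any_eq_true, List.count_pos_iff]

lemma pv_aceLoop_id (n : Nat) (s : Int) (h : ¬ 21 < s) : pvAceLoop n s = s := by
  cases n <;> simp [pvAceLoop, h]

lemma pv_aceLoop_main (n : Nat) (base : Int) (hb : (n : Int) ≤ base)
    (hs : 21 < base + 10 * (n : Int)) :
    pvAceLoop n (base + 10 * (n : Int)) = if 0 < n ∧ base + 10 ≤ 21 then base + 10 else base := by
  induction n generalizing base with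
  | zero => simp [pvAceLoop]
  | succ n ih =>
    have hstep : pvAceLoop (n + 1) (base + 10 * (((n : Nat) + 1 : Nat) : Int))
        = pvAceLoop n (base + 10 * (n : Int)) := by
      have he : base + 10 * (((n : Nat) + 1 : Nat) : Int) - 10 = base + 10 * (n : Int) := by
        push_cast; ring
      simp only [pvAceLoop, if_pos (by push_cast at hs ⊢; omega :
        21 < base + 10 * (((n : Nat) + 1 : Nat) : Int))]
      rw [he]
    rw [hstep]
    by_cases h2 : 21 < base + 10 * (n : Int)
    · rw [ih base (by push_cast at hb; omega) h2]
      split_ifs <;> push_cast at * <;> omega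
    · rw [pv_aceLoop_id _ _ h2]
      split_ifs <;> push_cast at * <;> omega

lemma pv_valueB_char (h : List String) :
    pvValueB h = if 0 < List.count "A" h ∧ (h.map pvCardW).sum ≤ 11
      then (h.map pvCardW).sum + 10 else (h.map pvCardW).sum := by
  simp only [pvValueB, pv_stepB_fold, Bool.false_or, zero_add]
  by_cases hace : (h.any fun c => c == "A") = true
  · have hc := (pv_any_iff_count h).mp hace
    simp [hace, hc]
  · have hc : ¬ 0 < List.count "A" h := fun hp => hace ((pv_any_iff_count h).mpr hp)
    simp [hace, hc]

lemma pv_val_eq (h : List String) : pvValA h = pvValueB h := by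
  have hge := pv_base_ge_count h
  rw [pv_valueB_char]
  simp only [pvValA, pv_foldl_sum, PySem.List.count_eq, zero_add, pv_sum_split]
  by_cases hs : 21 < (h.map pvCardW).sum + 10 * (List.count "A" h : Int)
  · rw [if_pos hs, pv_aceLoop_main _ _ hge hs]
    split_ifs <;> omega
  · rw [if_neg hs]
    split_ifs <;> omega

-- ===== VERDICT =====
theorem blackjack_hand_greater_than_spec : Claim_equal_blackjack_hand_greater_than := by
  intro h1 h2 _
  unfold Spec_blackjack_hand_greater_than blackjack_hand_greater_than blackjack_hand_greater_than_alt
  rw [pv_val_eq, pv_val_eq]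
  by_cases hv : 21 < pvValueB h1
  · simp [hv, not_le.mpr hv]
  · simp [hv, not_lt.mp hv]
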